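-- pv_equiv track=rewrite | github.com/iChristGit/OpenWebui-Tools | Tools/sports.py | _pills_html
-- ===== SOURCE A (Python) =====
-- def _pills_html(plains: list) -> str:
--     live = sum(1 for p in plains if p.get("state") == "live")
--     done = sum(1 for p in plains if p.get("state") == "final")
--     soon = sum(1 for p in plains if p.get("state") == "upcoming")
--     out = []
--     if live:
--         out.append(f'<span class="sp-pill live">🔴 {live} Live</span>')
--     if done:
--         out.append(f'<span class="sp-pill done">✔ {done} Finished</span>')
--     if soon:
--         out.append(f'<span class="sp-pill soon">📅 {soon} Upcoming</span>')
--     return '<div class="sp-pills">' + "".join(out) + "</div>" if out else ""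
-- ===== SOURCE B (Python) =====
-- def _pills_html(plains: list) -> str:
--     counts = {}
--     for p in plains:
--         s = p.get("state")
--         counts[s] = counts.get(s, 0) + 1
--     table = [("live", "live", "\U0001F534", "Live"),
--              ("final", "done", "\u2714", "Finished"),
--              ("upcoming", "soon", "\U0001F4C5", "Upcoming")]
--     pills = "".join(
--         f'<span class="sp-pill {cls}">{icon} {n} {label}</span>'
--         for key, cls, icon, label in table
--         if (n := counts.get(key, 0))
--     )
--     return f'<div class="sp-pills">{pills}</div>' if pills else ""
-- ===== Notes on version B (the rewrite author's own statement) =====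
-- stated objective: alternative
-- what changed: Three separate scans of plains (one per state) are replaced by a single pass that builds a frequency table of states, which a data-driven (key, class, icon, label) table then reads to emit the pills.
import Mathlib
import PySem

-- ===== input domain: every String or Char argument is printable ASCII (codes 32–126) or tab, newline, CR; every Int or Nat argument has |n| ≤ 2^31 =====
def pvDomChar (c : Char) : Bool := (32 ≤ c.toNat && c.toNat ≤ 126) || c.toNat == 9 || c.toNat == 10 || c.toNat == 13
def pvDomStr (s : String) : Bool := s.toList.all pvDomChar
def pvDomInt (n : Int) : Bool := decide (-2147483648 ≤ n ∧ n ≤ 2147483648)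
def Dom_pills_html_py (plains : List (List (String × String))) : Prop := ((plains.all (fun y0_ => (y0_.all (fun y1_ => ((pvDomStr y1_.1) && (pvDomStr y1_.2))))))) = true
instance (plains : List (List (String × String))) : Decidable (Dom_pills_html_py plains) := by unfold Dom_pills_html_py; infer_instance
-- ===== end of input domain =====

-- B replaces A's three per-state scans by one counting pass plus a data-driven pill table (objective: alternative, same cost class).

-- ===== PORT A =====
-- A: three generator-sum scans, then sequential conditional appends, then join.
def pills_html_py (plains : List (List (String × String))) : String :=
  let live : Int := plains.foldl (fun acc p => if (PySem.Dict.mk p).get? "state" = some "live" then acc + 1 else acc) 0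
  let done : Int := plains.foldl (fun acc p => if (PySem.Dict.mk p).get? "state" = some "final" then acc + 1 else acc) 0
  let soon : Int := plains.foldl (fun acc p => if (PySem.Dict.mk p).get? "state" = some "upcoming" then acc + 1 else acc) 0
  let out : List (List Char) := []
  let out := if live ≠ 0 then out ++ ["<span class=\"sp-pill live\">🔴 ".toList ++ PySem.Int.toChars live ++ " Live</span>".toList] else out
  let out := if done ≠ 0 then out ++ ["<span class=\"sp-pill done\">✔ ".toList ++ PySem.Int.toChars done ++ " Finished</span>".toList] else out
  let out := if soon ≠ 0 then out ++ ["<span class=\"sp-pill soon\">📅 ".toList ++ PySem.Int.toChars soon ++ " Upcoming</span>".toList] else out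
  if out ≠ [] then String.ofList ("<div class=\"sp-pills\">".toList ++ PySem.Chars.join [] out ++ "</div>".toList) else ""

-- ===== PORT B =====
-- B: one counting pass into a dict keyed by p.get("state"), then a join over a filtered literal table.
def pills_html_py_alt (plains : List (List (String × String))) : String :=
  let counts : PySem.Dict (Option String) Int :=
    plains.foldl (fun d p => d.insert ((PySem.Dict.mk p).get? "state") (d.getD ((PySem.Dict.mk p).get? "state") 0 + 1)) PySem.Dict.empty
  let table : List (String × String × String × String) :=
    [("live", "live", "🔴", "Live"), ("final", "done", "✔", "Finished"), ("upcoming", "soon", "📅", "Upcoming")]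
  let pills : List Char :=
    PySem.Chars.join []
      ((table.filter (fun r => counts.getD (some r.1) 0 ≠ 0)).map (fun r =>
        "<span class=\"sp-pill ".toList ++ r.2.1.toList ++ "\">".toList ++ r.2.2.1.toList ++ " ".toList ++
          PySem.Int.toChars (counts.getD (some r.1) 0) ++ " ".toList ++ r.2.2.2.toList ++ "</span>".toList))
  if pills ≠ [] then String.ofList ("<div class=\"sp-pills\">".toList ++ pills ++ "</div>".toList) else ""

-- ===== PRECONDITION & SPEC =====
def Spec_pills_html_py (plains : List (List (String × String))) (out : String) : Prop := out = pills_html_py_alt plains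
instance (plains : List (List (String × String))) (out : String) : Decidable (Spec_pills_html_py plains out) := by unfold Spec_pills_html_py; infer_instance

-- ===== CLAIM (what is proved, stated in full; the proofs are below) =====
def Claim_equal_pills_html_py : Prop := ∀ (plains : List (List (String × String))), Dom_pills_html_py plains → Spec_pills_html_py plains (pills_html_py plains)

-- ===== LEMMAS AND PROOFS =====
theorem fold_insert_key {α κ : Type} [BEq κ] (l : List α) (key : α → κ)
    (d : PySem.Dict κ Int) :
    l.foldl (fun d p => d.insert (key p) (d.getD (key p) 0 + 1)) d
    = (l.map key).foldl (fun d s => d.insert s (d.getD s 0 + 1)) d := by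
  induction l generalizing d with
  | nil => rfl
  | cons x xs ih => simp [ih]

theorem counts_getD (plains : List (List (String × String))) (k : String) :
    (plains.foldl (fun d p => d.insert ((PySem.Dict.mk p).get? "state")
        (d.getD ((PySem.Dict.mk p).get? "state") 0 + 1))
      (PySem.Dict.empty : PySem.Dict (Option String) Int)).getD (some k) 0
    = plains.foldl (fun acc p => if (PySem.Dict.mk p).get? "state" = some k then acc + 1 else acc) 0 := by
  rw [PySem.List.foldl_ite_add_one,
      fold_insert_key plains (fun p => (PySem.Dict.mk p).get? "state"),
      PySem.Dict.getD_foldl_insert_add_one]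
  simp [List.count_eq_countP, List.countP_map, Function.comp_def]
  exact List.countP_congr (fun x _ => by simp)

-- ===== VERDICT (by name: the statement is the Claim_ definition above) =====
theorem pills_html_py_spec : Claim_equal_pills_html_py := by
  intro plains _
  unfold Spec_pills_html_py
  simp only [pills_html_py, pills_html_py_alt, counts_getD]
  by_cases h1 : plains.foldl (fun acc p => if (PySem.Dict.mk p).get? "state" = some "live" then acc + 1 else acc) (0:Int) = 0 <;>
  by_cases h2 : plains.foldl (fun acc p => if (PySem.Dict.mk p).get? "state" = some "final" then acc + 1 else acc) (0:Int) = 0 <;>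
  by_cases h3 : plains.foldl (fun acc p => if (PySem.Dict.mk p).get? "state" = some "upcoming" then acc + 1 else acc) (0:Int) = 0 <;>
    simp [h1, h2, h3, PySem.Chars.join, List.intercalate, List.append_assoc]
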